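-- pv_equiv track=rewrite | github.com/MiladAbdullah/covid19-kurdistan | life/life.py | is_road
-- ===== SOURCE A (Python) =====
-- def is_road(location):
--     road_ranges = [(i*5,(i*5)+9) for i in range(1,20,4)]
--     x_c = location[1]
--     y_c = location[0]
--
--     for x_ranges in road_ranges:
--         for y_ranges in road_ranges:
--             if x_c>=x_ranges[0] and  x_c<=x_ranges[1] and y_c>=y_ranges[0] and y_c<=y_ranges[1]:
--                 return 0
--     return 1
-- ===== SOURCE B (Python) =====
-- def is_road(location):
--     road_ranges = [(i * 5, (i * 5) + 9) for i in range(1, 20, 4)]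
--     x_ok = any(lo <= location[1] <= hi for (lo, hi) in road_ranges)
--     y_ok = any(lo <= location[0] <= hi for (lo, hi) in road_ranges)
--     return 0 if x_ok and y_ok else 1
-- ===== Notes on version B (the rewrite author's own statement) =====
-- stated objective: simpler
-- what changed: Replaced the nested 5x5 scan over (x_range, y_range) pairs with two independent single passes (one per coordinate), exploiting that the existential over pairs factors into a conjunction of per-coordinate existentials.
import Mathlib
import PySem

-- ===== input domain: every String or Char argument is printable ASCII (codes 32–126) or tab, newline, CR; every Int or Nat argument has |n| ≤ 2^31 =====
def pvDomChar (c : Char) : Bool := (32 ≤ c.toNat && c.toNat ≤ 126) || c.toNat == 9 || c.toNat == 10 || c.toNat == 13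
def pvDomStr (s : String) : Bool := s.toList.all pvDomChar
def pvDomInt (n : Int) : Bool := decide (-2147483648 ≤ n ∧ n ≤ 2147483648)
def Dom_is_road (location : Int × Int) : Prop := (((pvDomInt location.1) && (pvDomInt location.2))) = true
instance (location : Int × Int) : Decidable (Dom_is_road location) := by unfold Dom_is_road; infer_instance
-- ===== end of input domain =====

-- B: the nested 5x5 pair scan of A is replaced by two independent per-coordinate passes (simpler decomposition; same values).
-- ===== PORT A =====
-- Nested loops over the same literal range list, early return 0 via Option.
def roadRanges : List (Int × Int) :=
  (PySem.List.pyRange 1 20 4).map (fun i => (i * 5, i * 5 + 9))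

def isRoadInner (x_c y_c : Int) (xr : Int × Int) : List (Int × Int) → Option Int
  | [] => none
  | yr :: rest =>
    if x_c ≥ xr.1 ∧ x_c ≤ xr.2 ∧ y_c ≥ yr.1 ∧ y_c ≤ yr.2 then some 0
    else isRoadInner x_c y_c xr rest

def isRoadOuter (x_c y_c : Int) (rr : List (Int × Int)) : List (Int × Int) → Option Int
  | [] => none
  | xr :: rest =>
    match isRoadInner x_c y_c xr rr with
    | some v => some v
    | none => isRoadOuter x_c y_c rr rest

def is_road (location : Int × Int) : Int :=
  let road_ranges := roadRanges
  let x_c := location.2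
  let y_c := location.1
  (isRoadOuter x_c y_c road_ranges road_ranges).getD 1

-- ===== PORT B =====
-- Two independent single passes, one per coordinate.
def is_road_alt (location : Int × Int) : Int :=
  let road_ranges := roadRanges
  let x_ok := road_ranges.any (fun r => decide (r.1 ≤ location.2 ∧ location.2 ≤ r.2))
  let y_ok := road_ranges.any (fun r => decide (r.1 ≤ location.1 ∧ location.1 ≤ r.2))
  if x_ok && y_ok then 0 else 1
-- ===== PRECONDITION & SPEC =====
def Spec_is_road (location : Int × Int) (out : Int) : Prop := out = is_road_alt location
instance (location : Int × Int) (out : Int) : Decidable (Spec_is_road location out) := by unfold Spec_is_road; infer_instance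

-- ===== CLAIM (what is proved, stated in full; the proofs are below) =====
def Claim_equal_is_road : Prop := ∀ (location : Int × Int), Dom_is_road location → Spec_is_road location (is_road location)

-- ===== LEMMAS AND PROOFS =====

-- ===== VERDICT (by name: the statement is the Claim_ definition above) =====
lemma inner_eq (x y : Int) (xr : Int × Int) (l : List (Int × Int)) :
    isRoadInner x y xr l =
      if (xr.1 ≤ x ∧ x ≤ xr.2) ∧ l.any (fun yr => decide (yr.1 ≤ y ∧ y ≤ yr.2)) then some 0
      else none := by
  induction l with
  | nil => simp [isRoadInner]
  | cons yr rest ih =>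
    simp only [isRoadInner, ih, List.any_cons, ge_iff_le]
    by_cases hcd : yr.1 ≤ y ∧ y ≤ yr.2
    · by_cases hab : xr.1 ≤ x ∧ x ≤ xr.2
      · rw [if_pos (by tauto)]
        simp only [decide_eq_true hcd, Bool.true_or]
        rw [if_pos ⟨hab, trivial⟩]
      · simp only [decide_eq_true hcd, Bool.true_or]
        rw [if_neg (by tauto), if_neg (by tauto), if_neg (by tauto)]
    · simp only [decide_eq_false hcd, Bool.false_or]
      rw [if_neg (by tauto)]

lemma outer_eq (x y : Int) (rr l : List (Int × Int)) :
    isRoadOuter x y rr l =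
      if l.any (fun xr => decide (xr.1 ≤ x ∧ x ≤ xr.2)) ∧
         rr.any (fun yr => decide (yr.1 ≤ y ∧ y ≤ yr.2)) then some 0
      else none := by
  induction l with
  | nil => simp [isRoadOuter]
  | cons xr rest ih =>
    simp only [isRoadOuter, inner_eq, ih, List.any_cons]
    by_cases hab : xr.1 ≤ x ∧ x ≤ xr.2
    · by_cases hay : (rr.any (fun yr => decide (yr.1 ≤ y ∧ y ≤ yr.2))) = true
      · rw [if_pos ⟨hab, hay⟩]
        simp only [decide_eq_true hab, Bool.true_or]
        rw [if_pos ⟨trivial, hay⟩]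
      · rw [if_neg (fun h => absurd h.2 hay), if_neg (fun h => absurd h.2 hay),
          if_neg (fun h => absurd h.2 hay)]
    · simp only [decide_eq_false hab, Bool.false_or]
      rw [if_neg (by tauto)]

theorem is_road_spec : Claim_equal_is_road := by
  intro location _
  obtain ⟨y, x⟩ := location
  show (isRoadOuter x y roadRanges roadRanges).getD 1 =
    if (roadRanges.any (fun r => decide (r.1 ≤ x ∧ x ≤ r.2)) &&
        roadRanges.any (fun r => decide (r.1 ≤ y ∧ y ≤ r.2))) then 0 else 1
  rw [outer_eq]
  by_cases hx : (roadRanges.any (fun xr => decide (xr.1 ≤ x ∧ x ≤ xr.2))) = true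
  · by_cases hy : (roadRanges.any (fun yr => decide (yr.1 ≤ y ∧ y ≤ yr.2))) = true
    · rw [if_pos ⟨hx, hy⟩, Option.getD_some, hx, hy]
      rfl
    · have hy' : (roadRanges.any (fun yr => decide (yr.1 ≤ y ∧ y ≤ yr.2))) = false := by
        simpa using hy
      rw [if_neg (fun h => absurd h.2 hy), Option.getD_none, hy', Bool.and_false]
      rfl
  · have hx' : (roadRanges.any (fun xr => decide (xr.1 ≤ x ∧ x ≤ xr.2))) = false := by
      simpa using hx
    rw [if_neg (fun h => absurd h.1 hx), Option.getD_none, hx', Bool.false_and]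
    rfl
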